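-- pv_equiv track=rewrite | github.com/Lospel/pythonProject | pythonProject/등대.py | solution
-- ===== SOURCE A (Python) =====
-- from collections import defaultdict
--
-- def solution(n, lighthouse):
--     # 트리
--     conn = defaultdict(list)
--
--     # 양방향 트리
--     for a, b in lighthouse:
--         conn[a - 1].append(b - 1)
--         conn[b - 1].append(a - 1)
--
--     # 동적 프로그래밍
--     visited = [False for _ in range(len(conn))]
--
--     # 등대 값
--     dp = [[0, 0] for _ in range(len(conn))]
--
--     def dfs(node):
--         visited[node] = True
--         leaf_list = list()
--
--         for leaf in conn[node]:
--             if visited[leaf]: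
--                 continue
--             leaf_list.append(leaf)
--             dfs(leaf)
--
--         # 등대 불, 0 = 끄는것, 1 = 키는것
--         dp[node][0] = 0
--         dp[node][1] = 1
--
--         for leaf in leaf_list:
--             # 루트 노드 등대 켜기 : 자식 노드는 켜도 안켜도 상관 없으니 최소값을 더한다. 즉, 자식 노드는 최소한으로 꺼진 것으로 판단.
--             dp[node][1] += min(dp[leaf])
--             # 루트 노드 등대 끄기 : 자식 노드는 무조건 켜져 있어야 하니 자식 노드의 등대 값을 더한다.
--             dp[node][0] += dp[leaf][1]
--
--         return
--
--     dfs(0)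
--
--     return min(dp[0])  # 루트 노드가 켜진 값과 꺼진 값 중의 최소값이 최소 등대 불 값이다.
-- ===== SOURCE B (Python) =====
-- from collections import defaultdict
--
-- def solution(n, lighthouse):
--     # Iterative post-order DFS with an explicit stack instead of recursion.
--     conn = defaultdict(list)
--     for a, b in lighthouse:
--         conn[a - 1].append(b - 1)
--         conn[b - 1].append(a - 1)
--
--     m = len(conn)
--     visited = [False] * m
--     dp = [[0, 0] for _ in range(m)]
--
--     visited[0] = True
--     stack = [(0, list(conn.get(0, [])), [])]
--     while stack:
--         node, rest, kids = stack.pop()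
--         if rest:
--             leaf, rest = rest[0], rest[1:]
--             if visited[leaf]:
--                 stack.append((node, rest, kids))
--             else:
--                 visited[leaf] = True
--                 stack.append((node, rest, kids + [leaf]))
--                 stack.append((leaf, list(conn.get(leaf, [])), []))
--         else:
--             off = sum(dp[c][1] for c in kids)
--             on = 1 + sum(min(dp[c]) for c in kids)
--             dp[node] = [off, on]
--
--     return min(dp[0])
-- ===== Notes on version B (the rewrite author's own statement) =====
-- stated objective: alternative
-- what changed: The recursive DFS with a nested dfs() closure mutating outer state is replaced by an iterative post-order traversal driven by an explicit stack of (node, remaining-neighbours, children) frames, with each node's dp pair computed from closed sums over its children at pop time.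
-- outside the precondition, e.g. on solution(0, [[1, 2], [7, 8]]): A returns 1, B returns 1
import Mathlib
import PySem

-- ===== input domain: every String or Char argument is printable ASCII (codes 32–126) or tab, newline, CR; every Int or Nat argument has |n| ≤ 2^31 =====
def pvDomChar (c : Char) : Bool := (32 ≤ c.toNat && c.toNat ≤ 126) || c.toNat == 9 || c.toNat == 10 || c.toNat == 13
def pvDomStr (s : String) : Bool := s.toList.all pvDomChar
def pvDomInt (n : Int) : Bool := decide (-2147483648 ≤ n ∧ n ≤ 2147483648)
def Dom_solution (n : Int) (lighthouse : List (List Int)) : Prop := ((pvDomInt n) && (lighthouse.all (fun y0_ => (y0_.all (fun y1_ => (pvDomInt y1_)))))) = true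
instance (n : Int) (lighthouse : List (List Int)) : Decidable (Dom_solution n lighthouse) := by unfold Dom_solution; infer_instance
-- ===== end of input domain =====

-- B replaces A's recursive DFS by an iterative post-order traversal with an explicit stack (same tree DP values); equivalence is about the return value on the stated precondition.

-- ===== PORT A =====
-- shared adjacency build: both Pythons build the same defaultdict(list) with the same appends
def bstep (d : PySem.Dict Int (List Int)) (row : List Int) : PySem.Dict Int (List Int) :=
  let a := row.getD 0 0   -- Pre_ guarantees each row has exactly 2 entries, so this unpacking is exact
  let b := row.getD 1 0
  (d.modify (a - 1) [] (fun v => v ++ [b - 1])).modify (b - 1) [] (fun v => v ++ [a - 1])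

def buildConn (lighthouse : List (List Int)) : PySem.Dict Int (List Int) :=
  lighthouse.foldl bstep PySem.Dict.empty

-- Python list indexing with negative wraparound: l[i] touches slot i+len(l) for i<0;
-- exact for -len <= i < len (Pre_ keeps all traversed ids in that range)
def pyIdx (i : Int) (len : Nat) : Nat := (if i < 0 then i + (len:Int) else i).toNat

-- A's second for-loop over leaf_list (dp[node][1] += min(dp[leaf]); dp[node][0] += dp[leaf][1]),
-- after dp[node] = [0, 1]; indices are in range under Pre_, so set/getD are exact there
def settleA (node : Int) (ll : List Int) (dp : List (Int × Int)) : List (Int × Int) :=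
  ll.foldl (fun dp leaf =>
    let c := dp.getD (pyIdx leaf dp.length) ((0:Int), (0:Int))
    let cur := dp.getD (pyIdx node dp.length) ((0:Int), (0:Int))
    dp.set (pyIdx node dp.length) (cur.1 + c.2, cur.2 + min c.1 c.2))
    (dp.set (pyIdx node dp.length) ((0:Int), (1:Int)))

-- A's dfs; the fuel argument is only a totality device (the top call passes enough fuel for
-- every input admitted by Pre_); loopA is dfs's first for-loop building leaf_list
mutual
def dfsA (conn : PySem.Dict Int (List Int)) : Nat → Int → (List Bool × List (Int × Int)) → (List Bool × List (Int × Int))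
  | 0, _, st => st
  | f + 1, node, st =>
    let st1 := (st.1.set (pyIdx node st.1.length) true, st.2)
    let r := loopA conn f (PySem.Dict.getD conn node []) st1 []
    (r.1.1, settleA node r.2 r.1.2)
termination_by f _ _ => (f, 0)

def loopA (conn : PySem.Dict Int (List Int)) : Nat → List Int → (List Bool × List (Int × Int)) → List Int → ((List Bool × List (Int × Int)) × List Int)
  | _, [], st, ll => (st, ll)
  | f, leaf :: rest, st, ll =>
    if st.1.getD (pyIdx leaf st.1.length) false then loopA conn f rest st ll
    else loopA conn f rest (dfsA conn f leaf st) (ll ++ [leaf])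
termination_by f l _ _ => (f, l.length + 1)
end

def solution (n : Int) (lighthouse : List (List Int)) : Int :=
  let conn := buildConn lighthouse
  let m := conn.size
  let st := dfsA conn (m + 1) 0 (List.replicate m false, List.replicate m ((0:Int), (0:Int)))
  let d := st.2.getD 0 ((0:Int), (0:Int))
  min d.1 d.2

-- ===== PORT B =====
-- B's while-loop over the explicit stack; frames are (node, remaining neighbours, children);
-- the fuel is only a totality device (the top call passes enough for every Pre_ input)
def runB (conn : PySem.Dict Int (List Int)) : Nat → (List Bool × List (Int × Int)) → List (Int × List Int × List Int) → (List Bool × List (Int × Int))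
  | 0, st, _ => st
  | _ + 1, st, [] => st
  | f + 1, st, (node, rest, kids) :: fs =>
    match rest with
    | leaf :: rest' =>
      if st.1.getD (pyIdx leaf st.1.length) false then runB conn f st ((node, rest', kids) :: fs)
      else runB conn f (st.1.set (pyIdx leaf st.1.length) true, st.2)
        ((leaf, PySem.Dict.getD conn leaf [], []) :: (node, rest', kids ++ [leaf]) :: fs)
    | [] =>
      let off := (kids.map (fun c => (st.2.getD (pyIdx c st.2.length) ((0:Int), (0:Int))).2)).sum
      let on := 1 + (kids.map (fun c => min (st.2.getD (pyIdx c st.2.length) ((0:Int), (0:Int))).1 (st.2.getD (pyIdx c st.2.length) ((0:Int), (0:Int))).2)).sum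
      runB conn f (st.1, st.2.set (pyIdx node st.2.length) (off, on)) fs

def solution_alt (n : Int) (lighthouse : List (List Int)) : Int :=
  let conn := buildConn lighthouse
  let m := conn.size
  let vis := (List.replicate m false).set 0 true
  let dp := List.replicate m ((0:Int), (0:Int))
  let st := runB conn ((2 * lighthouse.length + 2) * (m + 2)) (vis, dp) [(0, PySem.Dict.getD conn 0 [], [])]
  let d := st.2.getD 0 ((0:Int), (0:Int))
  min d.1 d.2

-- ===== PRECONDITION & SPEC =====
-- the 0-based endpoints a-1, b-1 of all edges, in order of appearance
def pvEnds (lighthouse : List (List Int)) : List Int :=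
  lighthouse.flatMap (fun r => [r.getD 0 0 - 1, r.getD 1 0 - 1])

-- number of distinct endpoints = len(conn) in both Pythons
def preM (lighthouse : List (List Int)) : Nat := (PySem.Set.ofList (pvEnds lighthouse)).length

-- Pre_ admits every input with at least one edge, each edge a 2-element list, and either every
-- 0-based endpoint a valid Python index into the arrays of length len(conn) (in
-- [-len(conn), len(conn)), so indexing may wrap but never raises), or node id 0 absent from the
-- edges (then the traversal stops at once and no endpoint is ever indexed).  Outside it A raises
-- IndexError (no edge, a non-pair row, an out-of-range id) — except for out-of-range ids that are
-- not reachable from node 0, where A happens to return before touching them; B's code shares that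
-- accident but such inputs lie outside the natural domain, so Pre_ excludes them.
def Pre_solution (n : Int) (lighthouse : List (List Int)) : Prop :=
  lighthouse ≠ [] ∧ (∀ r ∈ lighthouse, r.length = 2) ∧
    ((∀ x ∈ pvEnds lighthouse, -((preM lighthouse : Nat) : Int) ≤ x ∧ x < ((preM lighthouse : Nat) : Int))
      ∨ (0:Int) ∉ pvEnds lighthouse)

instance (n : Int) (lighthouse : List (List Int)) : Decidable (Pre_solution n lighthouse) := by
  unfold Pre_solution; infer_instance

def pvWitness_solution : Int × List (List Int) := (0, [[1, 2]])

def Spec_solution (n : Int) (lighthouse : List (List Int)) (out : Int) : Prop := out = solution_alt n lighthouse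
instance (n : Int) (lighthouse : List (List Int)) (out : Int) : Decidable (Spec_solution n lighthouse out) := by unfold Spec_solution; infer_instance

-- ===== CLAIM (what is proved, stated in full; the proofs are below) =====
def Claim_equal_solution : Prop := ∀ (n : Int) (lighthouse : List (List Int)), Dom_solution n lighthouse → Pre_solution n lighthouse → Spec_solution n lighthouse (solution n lighthouse)


-- ===== LEMMAS AND PROOFS =====

-- ---- generic list helpers ----
theorem getD_set_self {α : Type} (l : List α) (j : Nat) (a d : α) (h : j < l.length) :
    (l.set j a).getD j d = a := by
  simp [List.getD_eq_getElem?_getD, List.getElem?_set, h]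

theorem getD_set_ne {α : Type} (l : List α) (i j : Nat) (a d : α) (h : i ≠ j) :
    (l.set i a).getD j d = l.getD j d := by
  simp [List.getD_eq_getElem?_getD, List.getElem?_set, h]

theorem getD_set_true_of_true (vis : List Bool) (i j : Nat)
    (h : vis.getD i false = true) : (vis.set j true).getD i false = true := by
  by_cases hij : j = i
  · subst hij
    by_cases hj : j < vis.length
    · simp [List.getD_eq_getElem?_getD, List.getElem?_set, hj]
    · rw [List.set_eq_of_length_le (by omega)]; exact h
  · rw [getD_set_ne _ _ _ _ _ hij]; exact h

theorem pyIdx_lt (x : Int) (len : Nat) (h1 : -((len:Nat):Int) ≤ x) (h2 : x < ((len:Nat):Int)) :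
    pyIdx x len < len := by
  unfold pyIdx
  split <;> omega

theorem pyIdx_zero (len : Nat) : pyIdx 0 len = 0 := rfl

-- ---- count of unvisited entries ----
def Fc (vis : List Bool) : Nat :=
  ((Finset.range vis.length).filter (fun i => vis.getD i false = false)).card

theorem Fc_replicate (m : Nat) : Fc (List.replicate m false) = m := by
  unfold Fc
  rw [Finset.filter_true_of_mem]
  · simp
  · intro i hi
    have : i < m := by simpa using Finset.mem_range.mp hi
    simp [List.getD_eq_getElem?_getD, List.getElem?_replicate, this]

theorem Fc_set_true (vis : List Bool) (j : Nat) (h : j < vis.length)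
    (hf : vis.getD j false = false) : Fc (vis.set j true) + 1 = Fc vis := by
  unfold Fc
  have hset : (Finset.range (vis.set j true).length).filter
      (fun i => (vis.set j true).getD i false = false)
      = ((Finset.range vis.length).filter (fun i => vis.getD i false = false)).erase j := by
    ext i
    simp only [Finset.mem_erase, Finset.mem_filter, Finset.mem_range, List.length_set]
    constructor
    · intro ⟨hi, hv⟩
      by_cases hij : i = j
      · subst hij; rw [getD_set_self _ _ _ _ h] at hv; cases hv
      · exact ⟨hij, hi, by rwa [getD_set_ne _ _ _ _ _ (fun e => hij e.symm)] at hv⟩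
    · intro ⟨hij, hi, hv⟩
      exact ⟨hi, by rwa [getD_set_ne _ _ _ _ _ (fun e => hij e.symm)]⟩
  rw [hset]
  refine Finset.card_erase_add_one ?_
  simp only [Finset.mem_filter, Finset.mem_range]
  exact ⟨h, hf⟩

-- ---- monotonicity of the traversal state ----
def MonoSt (st st' : List Bool × List (Int × Int)) : Prop :=
  st'.1.length = st.1.length ∧ st'.2.length = st.2.length ∧
    ∀ i, st.1.getD i false = true → st'.1.getD i false = true

theorem monoSt_refl (st : List Bool × List (Int × Int)) : MonoSt st st :=
  ⟨rfl, rfl, fun _ h => h⟩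

theorem monoSt_trans {s1 s2 s3 : List Bool × List (Int × Int)}
    (h1 : MonoSt s1 s2) (h2 : MonoSt s2 s3) : MonoSt s1 s3 :=
  ⟨h2.1.trans h1.1, h2.2.1.trans h1.2.1, fun i h => h2.2.2 i (h1.2.2 i h)⟩

theorem Fc_mono_of {st st' : List Bool × List (Int × Int)} (h : MonoSt st st') :
    Fc st'.1 ≤ Fc st.1 := by
  unfold Fc
  rw [h.1]
  apply Finset.card_le_card
  intro i hi
  rw [Finset.mem_filter] at *
  refine ⟨hi.1, ?_⟩
  by_contra hc
  have ht : st.1.getD i false = true := by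
    cases hv : st.1.getD i false
    · exact absurd hv hc
    · rfl
  have := h.2.2 i ht
  rw [this] at hi
  cases hi.2

theorem length_settleA (node : Int) (ll : List Int) (dp : List (Int × Int)) :
    (settleA node ll dp).length = dp.length := by
  unfold settleA
  have haux : ∀ (ll : List Int) (dp0 : List (Int × Int)), (ll.foldl (fun dp leaf =>
      let c := dp.getD (pyIdx leaf dp.length) ((0:Int), (0:Int))
      let cur := dp.getD (pyIdx node dp.length) ((0:Int), (0:Int))
      dp.set (pyIdx node dp.length) (cur.1 + c.2, cur.2 + min c.1 c.2)) dp0).length = dp0.length := by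
    intro l
    induction l with
    | nil => intro dp0; rfl
    | cons a t ih => intro dp0; rw [List.foldl_cons, ih]; simp
  rw [haux]; simp

theorem loopA_mono (conn : PySem.Dict Int (List Int)) (f : Nat)
    (hd : ∀ node st, MonoSt st (dfsA conn f node st)) :
    ∀ (l : List Int) st ll, MonoSt st (loopA conn f l st ll).1 := by
  intro l
  induction l with
  | nil => intro st ll; rw [loopA]; exact monoSt_refl st
  | cons leaf rest ih =>
    intro st ll
    rw [loopA]
    by_cases hv : st.1.getD (pyIdx leaf st.1.length) false = true
    · rw [if_pos hv]; exact ih st ll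
    · rw [if_neg hv]; exact monoSt_trans (hd leaf st) (ih _ _)

theorem dfsA_mono (conn : PySem.Dict Int (List Int)) :
    ∀ (f : Nat) (node : Int) st, MonoSt st (dfsA conn f node st) := by
  intro f
  induction f with
  | zero => intro node st; rw [dfsA]; exact monoSt_refl st
  | succ f ih =>
    intro node st
    rw [dfsA]
    have h1 : MonoSt st (st.1.set (pyIdx node st.1.length) true, st.2) :=
      ⟨by simp, rfl, fun i h => getD_set_true_of_true _ _ _ h⟩
    have h2 := loopA_mono conn f ih (PySem.Dict.getD conn node [])
      (st.1.set (pyIdx node st.1.length) true, st.2) []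
    refine monoSt_trans (monoSt_trans h1 h2) ?_
    exact ⟨rfl, length_settleA _ _ _, fun _ h => h⟩

theorem dfsA_Fc (conn : PySem.Dict Int (List Int)) (f : Nat) (leaf : Int)
    (st : List Bool × List (Int × Int)) (h : pyIdx leaf st.1.length < st.1.length)
    (hf : st.1.getD (pyIdx leaf st.1.length) false = false) :
    Fc (dfsA conn (f + 1) leaf st).1 + 1 ≤ Fc st.1 := by
  rw [dfsA]
  have h1 : MonoSt (st.1.set (pyIdx leaf st.1.length) true, st.2)
      (loopA conn f (PySem.Dict.getD conn leaf []) (st.1.set (pyIdx leaf st.1.length) true, st.2) []).1 :=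
    loopA_mono conn f (fun node st => dfsA_mono conn f node st) _ _ _
  have h2 := Fc_mono_of h1
  have h3 := Fc_set_true st.1 (pyIdx leaf st.1.length) h hf
  dsimp only at h2 ⊢
  omega

-- ---- fuel stability of A's loop ----
theorem loopA_stable (conn : PySem.Dict Int (List Int)) (m : Nat)
    (HC : ∀ (a x : Int), x ∈ PySem.Dict.getD conn a [] → pyIdx x m < m) :
    ∀ (f g : Nat) (l : List Int) (st : List Bool × List (Int × Int)) (ll : List Int),
      st.1.length = m → (∀ x ∈ l, pyIdx x m < m) → Fc st.1 < f → Fc st.1 < g →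
      loopA conn f l st ll = loopA conn g l st ll := by
  intro f
  induction f using Nat.strong_induction_on with
  | _ f IH =>
    intro g l
    induction l with
    | nil => intro st ll _ _ _ _; rw [loopA, loopA]
    | cons leaf rest ihl =>
      intro st ll hL hl hf hg
      rw [loopA, loopA]
      by_cases hv : st.1.getD (pyIdx leaf st.1.length) false = true
      · rw [if_pos hv, if_pos hv]
        exact ihl st ll hL (fun x hx => hl x (List.mem_cons_of_mem _ hx)) hf hg
      · rw [if_neg hv, if_neg hv]
        obtain ⟨f1, rfl⟩ : ∃ f1, f = f1 + 1 := ⟨f - 1, by omega⟩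
        obtain ⟨g1, rfl⟩ : ∃ g1, g = g1 + 1 := ⟨g - 1, by omega⟩
        have hleaf : pyIdx leaf st.1.length < st.1.length := by
          rw [hL]; exact hl leaf (List.mem_cons_self ..)
        have hvf : st.1.getD (pyIdx leaf st.1.length) false = false := by
          cases hx : st.1.getD (pyIdx leaf st.1.length) false
          · rfl
          · exact absurd hx hv
        have hFm := Fc_set_true st.1 (pyIdx leaf st.1.length) hleaf hvf
        have hdfs : dfsA conn (f1 + 1) leaf st = dfsA conn (g1 + 1) leaf st := by
          rw [dfsA, dfsA]
          rw [IH f1 (by omega) g1 (PySem.Dict.getD conn leaf [])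
            (st.1.set (pyIdx leaf st.1.length) true, st.2) []
            (by simpa using hL)
            (fun x hx => HC leaf x hx)
            (by dsimp only; omega) (by dsimp only; omega)]
        rw [hdfs]
        have hmono := dfsA_mono conn (g1 + 1) leaf st
        have hFc := dfsA_Fc conn g1 leaf st hleaf hvf
        exact ihl (dfsA conn (g1 + 1) leaf st) (ll ++ [leaf])
          (hmono.1.trans hL)
          (fun x hx => hl x (List.mem_cons_of_mem _ hx))
          (by omega) (by omega)

-- ---- the built adjacency dict ----
theorem keys_modify_add (d : PySem.Dict Int (List Int)) (k : Int) (d0 : List Int)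
    (f : List Int → List Int) : (d.modify k d0 f).keys = PySem.Set.add d.keys k := by
  rw [PySem.Dict.keys_modify]
  by_cases h : d.contains k = true
  · rw [PySem.Dict.keys_insert_of_contains _ _ h, PySem.Set.add]
    simp
    exact (PySem.Dict.contains_iff_mem_keys d k).mp h
  · rw [PySem.Dict.keys_insert_of_not_contains _ _ (by simpa using h), PySem.Set.add]
    have : k ∉ d.keys := fun hm => h ((PySem.Dict.contains_iff_mem_keys d k).mpr hm)
    simp [this]

theorem buildConn_step (d : PySem.Dict Int (List Int)) (r : List Int) :
    bstep d r
    = (d.modify (r.getD 0 0 - 1) [] (fun v => v ++ [r.getD 1 0 - 1])).modify (r.getD 1 0 - 1) [] (fun v => v ++ [r.getD 0 0 - 1]) := rfl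

theorem keys_buildConn_aux (lighthouse : List (List Int)) :
    ∀ d : PySem.Dict Int (List Int),
      (lighthouse.foldl bstep d).keys
      = PySem.Set.update d.keys (pvEnds lighthouse) := by
  induction lighthouse with
  | nil => intro d; simp [pvEnds, PySem.Set.update_nil]
  | cons r t ih =>
    intro d
    rw [List.foldl_cons, ih, buildConn_step, keys_modify_add, keys_modify_add]
    have : pvEnds (r :: t) = (r.getD 0 0 - 1) :: (r.getD 1 0 - 1) :: pvEnds t := by
      simp [pvEnds]
    rw [this, PySem.Set.update_cons, PySem.Set.update_cons]

theorem keys_buildConn (lighthouse : List (List Int)) :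
    (buildConn lighthouse).keys = PySem.Set.ofList (pvEnds lighthouse) := by
  unfold buildConn
  rw [keys_buildConn_aux, PySem.Dict.keys_empty, PySem.Set.update_nil_left]

theorem size_buildConn (lighthouse : List (List Int)) :
    (buildConn lighthouse).size = preM lighthouse := by
  have h : (buildConn lighthouse).size = (buildConn lighthouse).keys.length := by
    simp [PySem.Dict.size, PySem.Dict.keys]
  rw [h, keys_buildConn]; rfl

theorem mem_bstep (d : PySem.Dict Int (List Int)) (r : List Int) (a x : Int)
    (h : x ∈ PySem.Dict.getD (bstep d r) a []) :
    x ∈ PySem.Dict.getD d a [] ∨ x = r.getD 0 0 - 1 ∨ x = r.getD 1 0 - 1 := by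
  rw [buildConn_step, PySem.Dict.getD_modify] at h
  split_ifs at h with h1
  · rcases List.mem_append.mp h with hm | hm
    · rw [PySem.Dict.getD_modify] at hm
      split_ifs at hm with h2
      · rcases List.mem_append.mp hm with hm' | hm'
        · exact Or.inl (by rw [h1, h2]; exact hm')
        · exact Or.inr (Or.inr (by simpa using hm'))
      · exact Or.inl (by rwa [h1])
    · exact Or.inr (Or.inl (by simpa using hm))
  · rw [PySem.Dict.getD_modify] at h
    split_ifs at h with h2
    · rcases List.mem_append.mp h with hm | hm
      · exact Or.inl (by rwa [h2])
      · exact Or.inr (Or.inr (by simpa using hm))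
    · exact Or.inl h

theorem mem_getD_buildConn_aux (a x : Int) (lighthouse : List (List Int)) :
    ∀ d : PySem.Dict Int (List Int),
      x ∈ PySem.Dict.getD (lighthouse.foldl bstep d) a []
      → x ∈ PySem.Dict.getD d a [] ∨ x ∈ pvEnds lighthouse := by
  induction lighthouse with
  | nil => intro d h; exact Or.inl h
  | cons r t ih =>
    intro d h
    rw [List.foldl_cons] at h
    have hpe : pvEnds (r :: t) = (r.getD 0 0 - 1) :: (r.getD 1 0 - 1) :: pvEnds t := by
      simp [pvEnds]
    rcases ih (bstep d r) h with h' | h'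
    · rcases mem_bstep d r a x h' with hm | hm | hm
      · exact Or.inl hm
      · exact Or.inr (by rw [hpe, hm]; exact List.mem_cons_self ..)
      · exact Or.inr (by rw [hpe, hm]; exact List.mem_cons_of_mem _ (List.mem_cons_self ..))
    · exact Or.inr (by rw [hpe]; exact List.mem_cons_of_mem _ (List.mem_cons_of_mem _ h'))

theorem mem_getD_buildConn (lighthouse : List (List Int)) (a x : Int)
    (h : x ∈ PySem.Dict.getD (buildConn lighthouse) a []) : x ∈ pvEnds lighthouse := by
  rcases mem_getD_buildConn_aux a x lighthouse PySem.Dict.empty h with h' | h'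
  · rw [PySem.Dict.getD_empty] at h'; cases h'
  · exact h'

theorem len_getD_buildConn (lighthouse : List (List Int)) (a : Int) :
    (PySem.Dict.getD (buildConn lighthouse) a []).length ≤ 2 * lighthouse.length := by
  have haux : ∀ d : PySem.Dict Int (List Int),
      (PySem.Dict.getD (lighthouse.foldl bstep d) a []).length
      ≤ (PySem.Dict.getD d a []).length + 2 * lighthouse.length := by
    induction lighthouse with
    | nil => intro d; simp
    | cons r t ih =>
      intro d
      rw [List.foldl_cons]
      refine le_trans (ih _) ?_
      have hb : (PySem.Dict.getD (bstep d r) a []).length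
          ≤ (PySem.Dict.getD d a []).length + 2 := by
        rw [buildConn_step, PySem.Dict.getD_modify]
        split_ifs with h1
        · subst h1
          rw [List.length_append, PySem.Dict.getD_modify]
          split_ifs with h2
          · rw [h2, List.length_append]; simp
          · simp
        · rw [PySem.Dict.getD_modify]
          split_ifs with h2
          · subst h2; rw [List.length_append]; simp
          · simp
      simp only [List.length_cons]
      omega
  have := haux PySem.Dict.empty
  rw [PySem.Dict.getD_empty] at this
  simpa using this

-- ---- settle as a closed sum (B's form) ----
theorem settleA_fold (node : Int) (dp : List (Int × Int)) (hn : pyIdx node dp.length < dp.length) :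
    ∀ (kids : List Int) (x y : Int), (∀ c ∈ kids, pyIdx c dp.length ≠ pyIdx node dp.length) →
    kids.foldl (fun dp leaf =>
      let c := dp.getD (pyIdx leaf dp.length) ((0:Int), (0:Int))
      let cur := dp.getD (pyIdx node dp.length) ((0:Int), (0:Int))
      dp.set (pyIdx node dp.length) (cur.1 + c.2, cur.2 + min c.1 c.2)) (dp.set (pyIdx node dp.length) (x, y))
    = dp.set (pyIdx node dp.length)
      (x + (kids.map (fun c => (dp.getD (pyIdx c dp.length) ((0:Int), (0:Int))).2)).sum,
       y + (kids.map (fun c => min (dp.getD (pyIdx c dp.length) ((0:Int), (0:Int))).1 (dp.getD (pyIdx c dp.length) ((0:Int), (0:Int))).2)).sum) := by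
  intro kids
  induction kids with
  | nil => intro x y _; simp
  | cons c rest ih =>
    intro x y hk
    rw [List.foldl_cons]
    have hcne : pyIdx node dp.length ≠ pyIdx c dp.length :=
      fun e => hk c (List.mem_cons_self ..) e.symm
    simp only [List.length_set]
    simp only [getD_set_ne _ _ _ _ _ hcne, getD_set_self _ _ _ _ hn, List.set_set]
    rw [ih _ _ (fun c' h' => hk c' (List.mem_cons_of_mem _ h'))]
    simp only [List.map_cons, List.sum_cons]
    congr 1
    rw [Prod.mk.injEq]
    constructor <;> ring

theorem settleA_eq_set (node : Int) (kids : List Int) (dp : List (Int × Int))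
    (hn : pyIdx node dp.length < dp.length)
    (hk : ∀ c ∈ kids, pyIdx c dp.length ≠ pyIdx node dp.length) :
    settleA node kids dp = dp.set (pyIdx node dp.length)
      ((kids.map (fun c => (dp.getD (pyIdx c dp.length) ((0:Int), (0:Int))).2)).sum,
       1 + (kids.map (fun c => min (dp.getD (pyIdx c dp.length) ((0:Int), (0:Int))).1 (dp.getD (pyIdx c dp.length) ((0:Int), (0:Int))).2)).sum) := by
  unfold settleA
  rw [settleA_fold node dp hn kids 0 1 hk]
  simp

theorem runB_nil (conn : PySem.Dict Int (List Int)) (k : Nat) (st : List Bool × List (Int × Int)) :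
    runB conn k st [] = st := by
  cases k <;> rw [runB]

-- ---- denotation of a stack configuration as A's recursion ----
def finishA (conn : PySem.Dict Int (List Int)) (node : Int) (rest ll : List Int)
    (st : List Bool × List (Int × Int)) : List Bool × List (Int × Int) :=
  let r := loopA conn (Fc st.1 + 1) rest st ll
  (r.1.1, settleA node r.2 r.1.2)

def denoteA (conn : PySem.Dict Int (List Int)) :
    List Bool × List (Int × Int) → List (Int × List Int × List Int) → List Bool × List (Int × Int)
  | st, [] => st
  | st, fr :: fs => denoteA conn (finishA conn fr.1 fr.2.1 fr.2.2 st) fs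

def InvB (m : Nat) (st : List Bool × List (Int × Int))
    (fs : List (Int × List Int × List Int)) : Prop :=
  st.1.length = m ∧ st.2.length = m ∧
    ∀ fr ∈ fs, pyIdx fr.1 m < m ∧ st.1.getD (pyIdx fr.1 m) false = true ∧
      (∀ x ∈ fr.2.1, pyIdx x m < m) ∧
      ∀ c ∈ fr.2.2, pyIdx c m < m ∧ pyIdx c m ≠ pyIdx fr.1 m

def MsB (D : Nat) (st : List Bool × List (Int × Int))
    (fs : List (Int × List Int × List Int)) : Nat :=
  (fs.map (fun fr => fr.2.1.length + 1)).sum + Fc st.1 * (D + 1) + 1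

theorem runB_eq_denote (conn : PySem.Dict Int (List Int)) (m D : Nat)
    (HC : ∀ (a x : Int), x ∈ PySem.Dict.getD conn a [] → pyIdx x m < m)
    (hD : ∀ a : Int, (PySem.Dict.getD conn a []).length ≤ D) :
    ∀ (f : Nat) (st : List Bool × List (Int × Int)) (fs : List (Int × List Int × List Int)),
      InvB m st fs → MsB D st fs ≤ f → runB conn f st fs = denoteA conn st fs := by
  intro f
  induction f with
  | zero =>
    intro st fs _ hMs
    exact absurd hMs (by unfold MsB; omega)
  | succ f ih =>
    intro st fs hInv hMs
    match fs with
    | [] => rw [runB, denoteA]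
    | (node, rest, kids) :: fs' =>
      have hfr := hInv.2.2 (node, rest, kids) (List.mem_cons_self ..)
      obtain ⟨hnode, hnvis, hrest, hkids⟩ := hfr
      match rest with
      | [] =>
        -- settle-and-pop step
        rw [runB, denoteA]
        have hn2 : pyIdx node st.2.length < st.2.length := by
          rw [hInv.2.1]; exact hnode
        have hk2 : ∀ c ∈ kids, pyIdx c st.2.length ≠ pyIdx node st.2.length := by
          rw [hInv.2.1]; exact fun c hc => (hkids c hc).2
        have hset : settleA node kids st.2 = st.2.set (pyIdx node st.2.length)
            ((kids.map (fun c => (st.2.getD (pyIdx c st.2.length) ((0:Int), (0:Int))).2)).sum,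
             1 + (kids.map (fun c => min (st.2.getD (pyIdx c st.2.length) ((0:Int), (0:Int))).1 (st.2.getD (pyIdx c st.2.length) ((0:Int), (0:Int))).2)).sum) :=
          settleA_eq_set node kids st.2 hn2 hk2
        have hfin : finishA conn node [] kids st = (st.1, settleA node kids st.2) := by
          unfold finishA
          rw [loopA]
        rw [hfin, hset]
        refine ih _ _ ⟨by dsimp only; exact hInv.1, by simpa using hInv.2.1, ?_⟩ ?_
        · intro fr hf
          have h3 := hInv.2.2 fr (List.mem_cons_of_mem _ hf)
          exact ⟨h3.1, h3.2.1, h3.2.2⟩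
        · unfold MsB at hMs ⊢
          dsimp only
          simp only [List.map_cons, List.sum_cons] at hMs
          omega
      | leaf :: rest' =>
        have hleafm : pyIdx leaf m < m := hrest leaf (List.mem_cons_self ..)
        have hidx : pyIdx leaf st.1.length = pyIdx leaf m := by rw [hInv.1]
        by_cases hv : st.1.getD (pyIdx leaf st.1.length) false = true
        · -- already visited: skip
          rw [runB]
          rw [if_pos hv]
          have hden : denoteA conn st ((node, leaf :: rest', kids) :: fs')
              = denoteA conn st ((node, rest', kids) :: fs') := by
            rw [denoteA, denoteA]
            dsimp only
            unfold finishA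
            rw [loopA, if_pos hv]
          rw [hden]
          refine ih _ _ ⟨hInv.1, hInv.2.1, ?_⟩ ?_
          · intro fr hf
            rcases List.mem_cons.mp hf with he | hf'
            · subst he
              exact ⟨hnode, hnvis, fun x hx => hrest x (List.mem_cons_of_mem _ hx), hkids⟩
            · exact hInv.2.2 fr (List.mem_cons_of_mem _ hf')
          · unfold MsB at hMs ⊢
            simp only [List.map_cons, List.sum_cons, List.length_cons] at hMs ⊢
            omega
        · -- fresh child: mark and push
          have hvf : st.1.getD (pyIdx leaf st.1.length) false = false := by
            cases hx : st.1.getD (pyIdx leaf st.1.length) false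
            · rfl
            · exact absurd hx hv
          have hleaflen : pyIdx leaf st.1.length < st.1.length := by
            rw [hInv.1]; exact hleafm
          have hFc := Fc_set_true st.1 (pyIdx leaf st.1.length) hleaflen hvf
          rw [runB]
          rw [if_neg hv]
          set st2 : List Bool × List (Int × Int) := (st.1.set (pyIdx leaf st.1.length) true, st.2) with hst2
          have hFc2 : Fc st2.1 + 1 = Fc st.1 := hFc
          have hClaim1 : finishA conn leaf (PySem.Dict.getD conn leaf []) [] st2
              = dfsA conn (Fc st.1 + 1) leaf st := by
            unfold finishA
            rw [hFc2, dfsA]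
          have hX := dfsA_Fc conn (Fc st.1) leaf st hleaflen hvf
          have hmonoX := dfsA_mono conn (Fc st.1 + 1) leaf st
          have hClaim2 : finishA conn node (leaf :: rest') kids st
              = finishA conn node rest' (kids ++ [leaf]) (dfsA conn (Fc st.1 + 1) leaf st) := by
            unfold finishA
            rw [loopA, if_neg hv]
            dsimp only
            rw [loopA_stable conn m HC (Fc st.1 + 1) (Fc (dfsA conn (Fc st.1 + 1) leaf st).1 + 1)
              rest' (dfsA conn (Fc st.1 + 1) leaf st) (kids ++ [leaf])
              (hmonoX.1.trans hInv.1)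
              (fun x hx => hrest x (List.mem_cons_of_mem _ hx))
              (by omega) (by omega)]
          have hInv2 : InvB m st2 ((leaf, PySem.Dict.getD conn leaf [], []) :: (node, rest', kids ++ [leaf]) :: fs') := by
            refine ⟨?_, hInv.2.1, ?_⟩
            · rw [hst2]; dsimp only; rw [List.length_set]; exact hInv.1
            intro fr hf
            rcases List.mem_cons.mp hf with he | hf'
            · subst he
              refine ⟨hleafm, ?_, fun x hx => HC leaf x hx, fun c hc => absurd hc (List.not_mem_nil)⟩
              rw [hst2]
              dsimp only
              rw [← hidx]
              exact getD_set_self _ _ _ _ hleaflen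
            rcases List.mem_cons.mp hf' with he | hf''
            · subst he
              refine ⟨hnode, getD_set_true_of_true _ _ _ hnvis,
                fun x hx => hrest x (List.mem_cons_of_mem _ hx), ?_⟩
              intro c hc
              rcases List.mem_append.mp hc with hc' | hc'
              · exact hkids c hc'
              · have : c = leaf := by simpa using hc'
                subst this
                refine ⟨hleafm, fun he => ?_⟩
                rw [hidx] at hvf
                rw [he] at hvf
                rw [hvf] at hnvis
                cases hnvis
            · have h3 := hInv.2.2 fr (List.mem_cons_of_mem _ hf'')
              exact ⟨h3.1, getD_set_true_of_true _ _ _ h3.2.1, h3.2.2⟩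
          have hMs2 : MsB D st2 ((leaf, PySem.Dict.getD conn leaf [], []) :: (node, rest', kids ++ [leaf]) :: fs') ≤ f := by
            unfold MsB at hMs ⊢
            simp only [List.map_cons, List.sum_cons, List.length_cons] at hMs ⊢
            have hprod : Fc st.1 * (D + 1) = Fc st2.1 * (D + 1) + (D + 1) := by
              rw [← hFc2]; ring
            have hDl := hD leaf
            omega
          rw [ih _ _ hInv2 hMs2]
          rw [denoteA, denoteA, denoteA]
          dsimp only
          rw [hClaim1, hClaim2]

theorem solution_eq_denote (n : Int) (lighthouse : List (List Int))
    (hPre : Pre_solution n lighthouse) :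
    solution n lighthouse = solution_alt n lighthouse := by
  obtain ⟨hne, hlen2, hbound⟩ := hPre
  unfold solution solution_alt
  dsimp only
  set conn := buildConn lighthouse with hconn
  set m := conn.size with hm
  have hmM : m = preM lighthouse := size_buildConn lighthouse
  have hm1 : 1 ≤ m := by
    rw [hmM]
    obtain ⟨r, t, rfl⟩ : ∃ r t, lighthouse = r :: t := by
      cases lighthouse with
      | nil => exact absurd rfl hne
      | cons r t => exact ⟨r, t, rfl⟩
    have hmem : (r.getD 0 0 - 1) ∈ PySem.Set.ofList (pvEnds (r :: t)) := by
      rw [PySem.Set.mem_ofList]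
      simp [pvEnds]
    exact List.length_pos_of_mem hmem
  rcases hbound with hbound | h0
  case inr =>
    -- node id 0 never occurs: the traversal finds no neighbour, both sides return min(0,1)=0
    have hkey : (0:Int) ∉ conn.keys := by
      rw [hconn, keys_buildConn, PySem.Set.mem_ofList]; exact h0
    have hnc : conn.contains 0 = false := by
      cases hx : conn.contains 0
      · rfl
      · exact absurd ((PySem.Dict.contains_iff_mem_keys conn 0).mp hx) hkey
    have hc0 : PySem.Dict.getD conn 0 [] = [] := PySem.Dict.getD_of_not_contains conn [] hnc
    obtain ⟨k, hk⟩ : ∃ k, (2 * lighthouse.length + 2) * (m + 2) = k + 1 :=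
      ⟨(2 * lighthouse.length + 2) * (m + 2) - 1, by
        have h : 0 < (2 * lighthouse.length + 2) * (m + 2) :=
          Nat.mul_pos (by omega) (by omega)
        omega⟩
    rw [hc0, hk, dfsA, hc0, loopA, runB]
    unfold settleA
    rw [runB_nil]
    simp only [List.foldl_nil, List.map_nil, List.sum_nil, List.length_replicate,
      List.length_set, pyIdx_zero]
    rw [getD_set_self _ _ _ _ (by simp; omega), getD_set_self _ _ _ _ (by simp; omega)]
    simp
  have HC : ∀ (a x : Int), x ∈ PySem.Dict.getD conn a [] → pyIdx x m < m := by
    intro a x hx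
    have hb := hbound x (mem_getD_buildConn lighthouse a x hx)
    rw [hmM]
    exact pyIdx_lt x (preM lighthouse) hb.1 hb.2
  have hD : ∀ a : Int, (PySem.Dict.getD conn a []).length ≤ 2 * lighthouse.length :=
    fun a => len_getD_buildConn lighthouse a
  set st0 : List Bool × List (Int × Int) :=
    ((List.replicate m false).set 0 true, List.replicate m ((0:Int), (0:Int))) with hst0
  have hlen0 : st0.1.length = m := by rw [hst0]; simp
  have hrep : Fc (List.replicate m false) = m := Fc_replicate m
  have h0lt : (0:Nat) < (List.replicate m false).length := by
    simp; omega
  have hrepf : (List.replicate m false).getD 0 false = false := by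
    simp only [List.getD_eq_getElem?_getD, List.getElem?_replicate]
    split <;> rfl
  have hF0 : Fc st0.1 + 1 = m := by
    rw [hst0]
    dsimp only
    rw [Fc_set_true _ _ h0lt hrepf, hrep]
  have hA : dfsA conn (m + 1) 0 (List.replicate m false, List.replicate m ((0:Int), (0:Int)))
      = denoteA conn st0 [((0:Int), PySem.Dict.getD conn 0 [], [])] := by
    rw [dfsA, denoteA, denoteA]
    unfold finishA
    simp only [pyIdx_zero]
    rw [hF0, hst0]
  have hInv0 : InvB m st0 [((0:Int), PySem.Dict.getD conn 0 [], [])] := by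
    refine ⟨hlen0, by rw [hst0]; simp, ?_⟩
    intro fr hf
    rcases List.mem_cons.mp hf with he | hf'
    · subst he
      refine ⟨by rw [pyIdx_zero]; omega, ?_, fun x hx => HC 0 x hx,
        fun c hc => absurd hc (List.not_mem_nil)⟩
      rw [hst0, pyIdx_zero]
      exact getD_set_self _ _ _ _ h0lt
    · exact absurd hf' (List.not_mem_nil)
  have hMs0 : MsB (2 * lighthouse.length) st0 [((0:Int), PySem.Dict.getD conn 0 [], [])]
      ≤ (2 * lighthouse.length + 2) * (m + 2) := by
    unfold MsB
    simp only [List.map_cons, List.sum_cons, List.map_nil, List.sum_nil]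
    have hc0 := hD 0
    have he1 : (2 * lighthouse.length + 2) * (m + 2)
        = 2 * lighthouse.length * m + 2 * m + 2 * (2 * lighthouse.length) + 4 := by ring
    have he2 : Fc st0.1 * (2 * lighthouse.length + 1)
        = Fc st0.1 * (2 * lighthouse.length) + Fc st0.1 := by ring
    have he3 : 2 * lighthouse.length * m
        = Fc st0.1 * (2 * lighthouse.length) + 2 * lighthouse.length := by
      rw [← hF0]; ring
    omega
  have hB := runB_eq_denote conn m (2 * lighthouse.length) HC hD
    ((2 * lighthouse.length + 2) * (m + 2)) st0 [((0:Int), PySem.Dict.getD conn 0 [], [])] hInv0 hMs0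
  rw [hA, ← hB]

-- ===== VERDICT (by name: the statement is the Claim_ definition above) =====
theorem solution_spec : Claim_equal_solution := by
  unfold Claim_equal_solution
  intro n lighthouse _ hPre
  unfold Spec_solution
  exact solution_eq_denote n lighthouse hPre
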